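-- pv_equiv track=rewrite | github.com/iiijam/python123answers | 第八周/回文素数.py | getPalindromePrime
-- ===== SOURCE A (Python) =====
-- def _isPalindrome(num):
--     return str(num) == str(num)[::-1]
--
-- def _isPrime(num):
--     if num < 2:
--         return False
--     for i in range(2,num):
--         if num % i == 0:
--             return False
--     return True
--
-- def getPalindromePrime(n):
--     i = 0
--     result = []
--     num = 0
--     while i < n:
--         if _isPalindrome(num) and _isPrime(num):
--             result.append(num)
--             i += 1
--         num += 1
--     return result
-- ===== SOURCE B (Python) =====
-- def _reverseNum(num):
--     rev = 0
--     q = num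
--     while q > 0:
--         rev = rev * 10 + q % 10
--         q //= 10
--     return rev
--
-- def _isPrimeFast(num):
--     if num < 2:
--         return False
--     i = 2
--     while i * i <= num:
--         if num % i == 0:
--             return False
--         i += 1
--     return True
--
-- def getPalindromePrime(n):
--     result = []
--     num = 0
--     while len(result) < n:
--         if _reverseNum(num) == num and _isPrimeFast(num):
--             result.append(num)
--         num += 1
--     return result
-- ===== Notes on version B (the rewrite author's own statement) =====
-- stated objective: alternative
-- what changed: B tests palindromicity by reversing the number arithmetically (digit loop, no string construction or slicing) and tests primality by trial division bounded by i*i <= num instead of dividing by every i in range(2, num), stopping the scan via len(result) instead of a separate counter; intended as faster (measured 2.66x at the largest size both finished, but both still time out on very large n), recorded as unconfirmed.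
import Mathlib
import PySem

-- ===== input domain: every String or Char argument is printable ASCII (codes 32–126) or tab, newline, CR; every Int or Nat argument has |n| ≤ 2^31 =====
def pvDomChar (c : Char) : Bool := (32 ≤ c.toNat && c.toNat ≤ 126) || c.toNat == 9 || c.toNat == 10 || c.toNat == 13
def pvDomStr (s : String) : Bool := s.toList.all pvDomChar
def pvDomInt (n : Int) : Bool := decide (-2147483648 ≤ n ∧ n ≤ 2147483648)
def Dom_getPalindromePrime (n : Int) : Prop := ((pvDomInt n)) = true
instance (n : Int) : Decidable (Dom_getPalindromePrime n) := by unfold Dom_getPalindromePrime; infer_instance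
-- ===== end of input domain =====

-- B tests palindromicity by arithmetic digit reversal (no strings) and primality by
-- sqrt-bounded trial division, and counts via len(result); the while loops (whose
-- termination for every n is conjectural) are fuel-totalized identically in both ports.


-- ===== PORT A =====
-- _isPalindrome: str(num) == str(num)[::-1]  (string comparison done on the char lists)
def pvIsPalindrome (num : Int) : Bool :=
  PySem.Int.toChars num == ((PySem.List.slice? (PySem.Int.toChars num) none none (-1)).getD [])

-- _isPrime: for i in range(2, num): if num % i == 0: return False
def pvPrimeLoop (num : Int) : List Int → Bool
  | [] => true
  | i :: rest => if PySem.Int.mod num i == 0 then false else pvPrimeLoop num rest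

def pvIsPrime (num : Int) : Bool :=
  if num < 2 then false else pvPrimeLoop num (PySem.List.pyRange 2 num 1)

-- the while loop of A; fuel-totalized with fuel 2^63 (one unit per iteration; whether the
-- Python loop terminates for every n is the open palindromic-prime conjecture)
def pvLoopA (fuel : Nat) (n i num : Int) (result : List Int) : List Int :=
  match fuel with
  | 0 => result
  | f + 1 =>
    if i < n then
      if pvIsPalindrome num && pvIsPrime num then
        pvLoopA f n (i + 1) (num + 1) (result ++ [num])
      else
        pvLoopA f n i (num + 1) result
    else result

def getPalindromePrime (n : Int) : List Int := pvLoopA (2 ^ 63) n 0 0 []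

-- ===== PORT B =====
-- _reverseNum: rev = 0; while q > 0: rev = rev*10 + q%10; q //= 10
-- fuel-totalized with one unit per digit; q.toNat + 1 units always suffice
def pvRevLoop (fuel : Nat) (rev q : Int) : Int :=
  match fuel with
  | 0 => rev
  | f + 1 =>
    if 0 < q then pvRevLoop f (rev * 10 + PySem.Int.mod q 10) (PySem.Int.floordiv q 10)
    else rev

def pvReverseNum (num : Int) : Int := pvRevLoop (num.toNat + 1) 0 num

-- _isPrimeFast: i = 2; while i*i <= num: …; fuel-totalized, num.toNat + 2 units suffice
def pvTrialLoop (num : Int) (fuel : Nat) (i : Int) : Bool :=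
  match fuel with
  | 0 => true
  | f + 1 =>
    if i * i ≤ num then
      if PySem.Int.mod num i == 0 then false else pvTrialLoop num f (i + 1)
    else true

def pvIsPrimeFast (num : Int) : Bool :=
  if num < 2 then false else pvTrialLoop num (num.toNat + 2) 2

-- the while loop of B (len(result) < n); fuel-totalized like A's
def pvLoopB (fuel : Nat) (n num : Int) (result : List Int) : List Int :=
  match fuel with
  | 0 => result
  | f + 1 =>
    if (result.length : Int) < n then
      pvLoopB f n (num + 1)
        (if pvReverseNum num == num && pvIsPrimeFast num then result ++ [num] else result)
    else result

def getPalindromePrime_alt (n : Int) : List Int := pvLoopB (2 ^ 63) n 0 []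

-- ===== PRECONDITION & SPEC =====
def Spec_getPalindromePrime (n : Int) (out : List Int) : Prop := out = getPalindromePrime_alt n
instance (n : Int) (out : List Int) : Decidable (Spec_getPalindromePrime n out) := by unfold Spec_getPalindromePrime; infer_instance

-- ===== CLAIM (what is proved, stated in full; the proofs are below) =====
def Claim_equal_getPalindromePrime : Prop := ∀ (n : Int), Dom_getPalindromePrime n → Spec_getPalindromePrime n (getPalindromePrime n)

-- ===== LEMMAS AND PROOFS =====

-- digitChar is injective below 10
lemma pv_digitChar_inj (a b : Nat) (ha : a < 10) (hb : b < 10)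
    (h : Nat.digitChar a = Nat.digitChar b) : a = b := by
  interval_cases a <;> interval_cases b <;> simp_all [Nat.digitChar]

-- map digitChar is injective on digit lists
lemma pv_map_digitChar_inj : ∀ (l1 l2 : List Nat), (∀ x ∈ l1, x < 10) → (∀ x ∈ l2, x < 10) →
    l1.map Nat.digitChar = l2.map Nat.digitChar → l1 = l2 := by
  intro l1
  induction l1 with
  | nil => intro l2 _ _ h; cases l2 <;> simp_all
  | cons a t ih =>
    intro l2 h1 h2 h
    cases l2 with
    | nil => simp_all
    | cons b t2 =>
      simp only [List.map_cons, List.cons.injEq] at h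
      have := pv_digitChar_inj a b (h1 a (by simp)) (h2 b (by simp)) h.1
      have := ih t2 (fun x hx => h1 x (by simp [hx])) (fun x hx => h2 x (by simp [hx])) h.2
      simp_all

-- Nat.toDigits via Nat.digits
lemma pv_toDigitsCore_eq (n : Nat) : ∀ (fuel : Nat) (ds : List Char), 0 < n → n < fuel →
    Nat.toDigitsCore 10 fuel n ds = ((Nat.digits 10 n).map Nat.digitChar).reverse ++ ds := by
  induction n using Nat.strong_induction_on with
  | _ n IH =>
    intro fuel ds hn hf
    match fuel with
    | 0 => omega
    | f + 1 =>
      rw [Nat.toDigitsCore]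
      rw [Nat.digits_def' (by norm_num : (1:Nat) < 10) hn]
      by_cases h0 : n / 10 = 0
      · simp [h0, Nat.digits_zero]
      · rw [if_neg h0]
        have hlt : n / 10 < n := Nat.div_lt_self hn (by norm_num)
        rw [IH (n / 10) hlt f _ (Nat.pos_of_ne_zero h0) (by omega)]
        simp

lemma pv_toDigits_eq (m : Nat) (hm : 0 < m) :
    Nat.toDigits 10 m = ((Nat.digits 10 m).map Nat.digitChar).reverse := by
  rw [Nat.toDigits, pv_toDigitsCore_eq m (m + 1) [] hm (by omega), List.append_nil]

-- the reversal loop computes ofDigits of the reversed digit list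
lemma pv_revLoop_eq : ∀ (fuel : Nat) (q rev : Int), 0 ≤ q →
    (Nat.digits 10 q.toNat).length ≤ fuel →
    pvRevLoop fuel rev q =
      rev * 10 ^ (Nat.digits 10 q.toNat).length +
        (Nat.ofDigits 10 (Nat.digits 10 q.toNat).reverse : Nat) := by
  intro fuel
  induction fuel with
  | zero =>
    intro q rev hq hlen
    have hnil : Nat.digits 10 q.toNat = [] := List.eq_nil_of_length_eq_zero (by omega)
    have hq0 : q.toNat = 0 := by
      by_contra hne; exact (Nat.digits_ne_nil_iff_ne_zero.mpr hne) hnil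
    have hq0' : q = 0 := by omega
    subst hq0'
    simp [pvRevLoop]
  | succ f ih =>
    intro q rev hq hlen
    by_cases hq0 : 0 < q
    · simp only [pvRevLoop, if_pos hq0]
      have hmod : PySem.Int.mod q 10 = ((q.toNat % 10 : Nat) : Int) := by
        rw [PySem.Int.mod_eq_emod_of_pos (by norm_num)]; omega
      have hdiv : PySem.Int.floordiv q 10 = ((q.toNat / 10 : Nat) : Int) := by
        rw [PySem.Int.floordiv_eq_ediv_of_pos (by norm_num)]; omega
      have hdigits : Nat.digits 10 q.toNat = q.toNat % 10 :: Nat.digits 10 (q.toNat / 10) :=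
        Nat.digits_def' (by norm_num) (by omega)
      rw [hdigits] at hlen
      have hlen' : (Nat.digits 10 (PySem.Int.floordiv q 10).toNat).length ≤ f := by
        rw [hdiv]; simp only [Int.toNat_natCast]
        simpa using hlen
      rw [ih (PySem.Int.floordiv q 10) (rev * 10 + PySem.Int.mod q 10)
        (by rw [hdiv]; positivity) hlen']
      rw [hdigits]
      have htn : (PySem.Int.floordiv q 10).toNat = q.toNat / 10 := by
        rw [hdiv]; exact Int.toNat_natCast _
      rw [htn, hmod]
      rw [List.reverse_cons, Nat.ofDigits_append, Nat.ofDigits_singleton]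
      simp only [List.length_cons, List.length_reverse, pow_succ]
      push_cast
      ring
    · have hq0' : q = 0 := by omega
      subst hq0'
      simp [pvRevLoop]

-- the reversed-number value
lemma pv_reverseNum_eq (num : Int) (h : 0 ≤ num) :
    pvReverseNum num = (Nat.ofDigits 10 (Nat.digits 10 num.toNat).reverse : Nat) := by
  have hlen : (Nat.digits 10 num.toNat).length ≤ num.toNat + 1 := by
    rw [Nat.digits_length_le_iff (by norm_num)]
    calc num.toNat < 10 ^ num.toNat := Nat.lt_pow_self (by norm_num)
      _ ≤ 10 ^ (num.toNat + 1) := Nat.pow_le_pow_right (by norm_num) (by omega)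
  rw [pvReverseNum, pv_revLoop_eq _ num 0 h hlen]
  ring

-- pointwise: A's string palindrome test equals B's arithmetic one (num ≥ 0)
lemma pv_pal_eq (num : Int) (h : 0 ≤ num) :
    pvIsPalindrome num = (pvReverseNum num == num) := by
  rcases eq_or_lt_of_le h with rfl | hpos
  · decide
  · have hm : 0 < num.toNat := by omega
    have hA : pvIsPalindrome num = true ↔
        Nat.digits 10 num.toNat = (Nat.digits 10 num.toNat).reverse := by
      rw [pvIsPalindrome, PySem.List.slice?_none_none_neg_one, Option.getD_some,
        PySem.Int.toChars, if_neg (by omega), beq_iff_eq,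
        pv_toDigits_eq num.toNat hm, List.reverse_reverse]
      constructor
      · intro hrev
        rw [← List.map_reverse] at hrev
        exact (pv_map_digitChar_inj _ _
          (fun x hx => Nat.digits_lt_base (by norm_num) (List.mem_reverse.mp hx))
          (fun x hx => Nat.digits_lt_base (by norm_num) hx) hrev).symm
      · intro hD
        conv_rhs => rw [hD]
        rw [← List.map_reverse, ← hD]
    have hB : (pvReverseNum num == num) = true ↔
        Nat.ofDigits 10 (Nat.digits 10 num.toNat).reverse = num.toNat := by
      rw [beq_iff_eq, pv_reverseNum_eq num h]
      omega
    rw [Bool.eq_iff_iff, hA, hB]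
    by_cases hmod : num.toNat % 10 = 0
    · have hDne : Nat.digits 10 num.toNat ≠ [] := Nat.digits_ne_nil_iff_ne_zero.mpr (by omega)
      have hdigits : Nat.digits 10 num.toNat = num.toNat % 10 :: Nat.digits 10 (num.toNat / 10) :=
        Nat.digits_def' (by norm_num) hm
      constructor
      · intro hD
        exfalso
        have hlast := Nat.getLast_digit_ne_zero 10 (m := num.toNat) (by omega)
        have h1 : (Nat.digits 10 num.toNat).getLast? = (Nat.digits 10 num.toNat).head? := by
          conv_lhs => rw [hD]
          exact List.getLast?_reverse
        have h2 : (Nat.digits 10 num.toNat).head? = some 0 := by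
          rw [hdigits]; simp [hmod]
        rw [List.getLast?_eq_some_getLast hDne, h2] at h1
        exact hlast (by simpa using h1)
      · intro hOf
        exfalso
        have hdig10 : ∀ x ∈ Nat.digits 10 (num.toNat / 10), x < 10 :=
          fun x hx => Nat.digits_lt_base (by norm_num) hx
        have hlt : Nat.ofDigits 10 (Nat.digits 10 num.toNat).reverse <
            10 ^ (Nat.digits 10 (num.toNat / 10)).length := by
          rw [hdigits, hmod, List.reverse_cons, Nat.ofDigits_append, Nat.ofDigits_singleton,
            Nat.mul_zero, Nat.add_zero]
          have hb := Nat.ofDigits_lt_base_pow_length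
            (l := (Nat.digits 10 (num.toNat / 10)).reverse) (by norm_num)
            (fun x hx => hdig10 x (List.mem_reverse.mp hx))
          rw [List.length_reverse] at hb
          exact hb
        have hge : 10 ^ (Nat.digits 10 (num.toNat / 10)).length ≤ num.toNat := by
          have h1 := Nat.base_pow_length_digits_le 10 num.toNat (by norm_num) (by omega)
          rw [hdigits] at h1
          simp only [List.length_cons, pow_succ] at h1
          omega
        omega
    · constructor
      · intro hD
        conv_rhs => rw [← Nat.ofDigits_digits 10 num.toNat]
        rw [← hD]
      · intro hOf
        have hDne : (Nat.digits 10 num.toNat).reverse ≠ [] := by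
          simp [Nat.digits_ne_nil_iff_ne_zero.mpr (by omega : num.toNat ≠ 0)]
        have hw2 : ∀ hh : (Nat.digits 10 num.toNat).reverse ≠ [],
            ((Nat.digits 10 num.toNat).reverse).getLast hh ≠ 0 := by
          intro hh
          rw [List.getLast_reverse]
          intro h0
          have hne : Nat.digits 10 num.toNat ≠ [] :=
            Nat.digits_ne_nil_iff_ne_zero.mpr (by omega)
          have h2 : (Nat.digits 10 num.toNat).head? = some (num.toNat % 10) := by
            rw [Nat.digits_def' (by norm_num) hm]; rfl
          rw [List.head?_eq_some_head hne, h0] at h2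
          exact hmod (by simpa using h2.symm)
        have := Nat.digits_ofDigits 10 (by norm_num) (Nat.digits 10 num.toNat).reverse
          (fun x hx => Nat.digits_lt_base (by norm_num) (List.mem_reverse.mp hx)) hw2
        rw [hOf] at this
        exact this

-- A's divisor scan as an all-quantifier
lemma pv_primeLoop_eq (num : Int) : ∀ (l : List Int),
    pvPrimeLoop num l = l.all (fun i => !(PySem.Int.mod num i == 0)) := by
  intro l
  induction l with
  | nil => rfl
  | cons i rest ih => by_cases h : PySem.Int.mod num i == 0 <;> simp [pvPrimeLoop, h, ih]

lemma pv_isPrime_iff (num : Int) (h2 : 2 ≤ num) :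
    pvIsPrime num = true ↔ ∀ i : Int, 2 ≤ i → i < num → ¬ i ∣ num := by
  rw [pvIsPrime, if_neg (by omega), pv_primeLoop_eq]
  simp only [List.all_eq_true, PySem.List.mem_pyRange_one, Bool.not_eq_eq_eq_not,
    Bool.not_true, beq_eq_false_iff_ne, ne_eq]
  constructor
  · intro h i hi hlt hdvd
    exact h i ⟨hi, hlt⟩ ((PySem.Int.mod_eq_zero_iff_dvd num i).mpr hdvd)
  · intro h i hi hm
    exact h i hi.1 hi.2 ((PySem.Int.mod_eq_zero_iff_dvd num i).mp hm)

-- B's trial loop as an all-quantifier (with enough fuel)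
lemma pv_trialLoop_iff : ∀ (fuel : Nat) (i num : Int), 1 ≤ i → 0 ≤ num → num < i + fuel →
    (pvTrialLoop num fuel i = true ↔ ∀ j : Int, i ≤ j → j * j ≤ num → ¬ j ∣ num) := by
  intro fuel
  induction fuel with
  | zero =>
    intro i num hi h0 hf
    simp only [pvTrialLoop, true_iff]
    intro j hij hjj hdvd
    have h1 : 1 ≤ j := by omega
    have : j * 1 ≤ j * j := by
      exact mul_le_mul_of_nonneg_left h1 (by omega)
    have hnum : num < i := by simpa using hf
    omega
  | succ f ih =>
    intro i num hi h0 hf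
    simp only [pvTrialLoop]
    by_cases hii : i * i ≤ num
    · rw [if_pos hii]
      by_cases hm : (PySem.Int.mod num i == 0) = true
      · rw [if_pos hm]
        constructor
        · intro hcl; cases hcl
        · intro hcl
          exact ((hcl i le_rfl hii)
            ((PySem.Int.mod_eq_zero_iff_dvd num i).mp (beq_iff_eq.mp hm))).elim
      · rw [if_neg hm]
        have hf' : num < i + 1 + (f : Int) := by push_cast at hf; omega
        have hi' : (1 : Int) ≤ i + 1 := by omega
        rw [ih (i + 1) num hi' h0 hf']
        constructor
        · intro hcl j hij hjj hdvd
          rcases eq_or_lt_of_le hij with rfl | hlt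
          · exact hm (beq_iff_eq.mpr ((PySem.Int.mod_eq_zero_iff_dvd num i).mpr hdvd))
          · exact hcl j (by omega) hjj hdvd
        · intro hcl j hij hjj hdvd
          exact hcl j (by omega) hjj hdvd
    · rw [if_neg hii]
      simp only [true_iff]
      intro j hij hjj hdvd
      have : i * i ≤ j * j := by nlinarith
      omega
lemma pv_isPrimeFast_iff (num : Int) (h2 : 2 ≤ num) :
    pvIsPrimeFast num = true ↔ ∀ j : Int, 2 ≤ j → j * j ≤ num → ¬ j ∣ num := by
  rw [pvIsPrimeFast, if_neg (by omega)]
  exact pv_trialLoop_iff (num.toNat + 2) 2 num (by omega) (by omega) (by push_cast; omega)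

-- pointwise: the two primality tests agree
lemma pv_prime_eq (num : Int) : pvIsPrime num = pvIsPrimeFast num := by
  by_cases h2 : 2 ≤ num
  · rw [Bool.eq_iff_iff, pv_isPrime_iff num h2, pv_isPrimeFast_iff num h2]
    constructor
    · intro h j hj hjj hdvd
      have hjlt : j < num := by nlinarith
      exact h j hj hjlt hdvd
    · intro h i hi hlt hdvd
      obtain ⟨c, hc⟩ := hdvd
      have hc2 : 2 ≤ c := by nlinarith
      by_cases hii : i * i ≤ num
      · exact h i hi hii ⟨c, hc⟩
      · have hci : c < i := by nlinarith
        exact h c hc2 (by nlinarith) ⟨i, by linarith [hc, mul_comm i c]⟩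
  · rw [pvIsPrime, pvIsPrimeFast, if_pos (by omega : num < 2), if_pos (by omega : num < 2)]

-- the stream of numbers A's loop appends, over a fuel-window starting at num
def pvHitsA : Nat → Int → List Int
  | 0, _ => []
  | f + 1, num =>
    if pvIsPalindrome num && pvIsPrime num then num :: pvHitsA f (num + 1)
    else pvHitsA f (num + 1)

def pvHitsB : Nat → Int → List Int
  | 0, _ => []
  | f + 1, num =>
    if pvReverseNum num == num && pvIsPrimeFast num then num :: pvHitsB f (num + 1)
    else pvHitsB f (num + 1)

lemma pv_hits_eq : ∀ (fuel : Nat) (num : Int), 0 ≤ num → pvHitsA fuel num = pvHitsB fuel num := by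
  intro fuel
  induction fuel with
  | zero => intro num _; rfl
  | succ f ih =>
    intro num h
    simp only [pvHitsA, pvHitsB, pv_pal_eq num h, pv_prime_eq num, ih (num + 1) (by omega)]

lemma pvLoopA_eq_take (fuel : Nat) : ∀ (n i num : Int) (r : List Int),
    pvLoopA fuel n i num r = r ++ (pvHitsA fuel num).take (n - i).toNat := by
  induction fuel with
  | zero => intro n i num r; simp [pvLoopA, pvHitsA]
  | succ f ih =>
    intro n i num r
    by_cases h : i < n
    · simp only [pvLoopA, if_pos h, pvHitsA]
      by_cases ht : (pvIsPalindrome num && pvIsPrime num) = true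
      · rw [if_pos ht, if_pos ht, ih]
        have hk : (n - i).toNat = (n - (i + 1)).toNat + 1 := by omega
        rw [hk, List.take_succ_cons, List.append_assoc, List.singleton_append]
      · rw [if_neg ht, if_neg ht, ih]
    · simp only [pvLoopA, if_neg h, pvHitsA]
      have hk : (n - i).toNat = 0 := by omega
      rw [hk, List.take_zero, List.append_nil]

lemma pvLoopB_eq_take (fuel : Nat) : ∀ (n num : Int) (r : List Int),
    pvLoopB fuel n num r = r ++ (pvHitsB fuel num).take (n - r.length).toNat := by
  induction fuel with
  | zero => intro n num r; simp [pvLoopB, pvHitsB]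
  | succ f ih =>
    intro n num r
    by_cases h : (r.length : Int) < n
    · simp only [pvLoopB, if_pos h, pvHitsB]
      by_cases ht : (pvReverseNum num == num && pvIsPrimeFast num) = true
      · rw [if_pos ht, if_pos ht, ih]
        have hlen : ((r ++ [num]).length : Int) = (r.length : Int) + 1 := by simp
        rw [hlen]
        have hk : (n - (r.length : Int)).toNat = (n - ((r.length : Int) + 1)).toNat + 1 := by omega
        rw [hk, List.take_succ_cons, List.append_assoc, List.singleton_append]
      · rw [if_neg ht, if_neg ht, ih]
    · simp only [pvLoopB, if_neg h, pvHitsB]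
      have hk : (n - (r.length : Int)).toNat = 0 := by omega
      rw [hk, List.take_zero, List.append_nil]

-- ===== VERDICT (by name: the statement is the Claim_ definition above) =====
theorem getPalindromePrime_spec : Claim_equal_getPalindromePrime := by
  intro n _
  unfold Spec_getPalindromePrime
  rw [getPalindromePrime, getPalindromePrime_alt, pvLoopA_eq_take, pvLoopB_eq_take,
    pv_hits_eq (2 ^ 63) 0 (by omega)]
  simp
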